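-- pv_equiv track=rewrite | github.com/kcx2366425574/LeetCode | leetcode/757_intersection_size_two.py | intersectionSizeTwo2
-- ===== SOURCE A (Python) =====
-- def intersectionSizeTwo2(intervals: list[list[int]]) -> int:
--     intervals.sort(key=lambda x: (x[0], -x[1]))
--     ans, n, m = 0, len(intervals), 2
--     vals = [[] for _ in range(n)]
--     for i in range(n - 1, -1, -1):
--         j = intervals[i][0]
--         for k in range(len(vals[i]), m):
--             ans += 1
--             for p in range(i - 1, -1, -1):
--                 if intervals[p][1] < j:
--                     break
--                 vals[p].append(j)
--             j += 1
--     return ans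
-- ===== SOURCE B (Python) =====
-- def intersectionSizeTwo2(intervals: list[list[int]]) -> int:
--     ans = 0
--     a = b = None  # the two smallest chosen points, a < b (None = nothing chosen yet)
--     for x in sorted(intervals, key=lambda x: (x[0], -x[1]), reverse=True):
--         s, e = x[0], x[1]
--         if a is None or e < a:
--             ans += 2
--             a, b = s, s + 1
--         elif e < b:
--             ans += 1
--             a, b = s, a
--     return ans
-- ===== Notes on version B (the rewrite author's own statement) =====
-- stated objective: alternative
-- what changed: A's backward sweep that re-propagates every chosen point into per-interval vals lists (with a break-scan over the prefix) is replaced by a single greedy pass over the same processing order (decreasing start, ties by increasing end) that only tracks the two smallest chosen points; it trades A's mutable per-interval bookkeeping for O(1) state.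
import Mathlib
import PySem

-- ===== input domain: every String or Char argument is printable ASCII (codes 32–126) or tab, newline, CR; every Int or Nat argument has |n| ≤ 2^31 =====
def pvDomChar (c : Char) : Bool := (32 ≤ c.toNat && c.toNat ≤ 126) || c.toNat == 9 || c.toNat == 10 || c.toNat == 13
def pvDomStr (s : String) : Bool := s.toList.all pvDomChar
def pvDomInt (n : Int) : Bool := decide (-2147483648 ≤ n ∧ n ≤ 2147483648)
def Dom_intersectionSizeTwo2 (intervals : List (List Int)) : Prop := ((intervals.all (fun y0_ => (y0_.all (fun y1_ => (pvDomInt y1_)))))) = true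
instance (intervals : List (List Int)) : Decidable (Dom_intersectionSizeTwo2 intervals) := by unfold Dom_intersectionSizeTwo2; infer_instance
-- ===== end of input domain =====

-- B replaces A's backward sweep (which re-propagates every chosen point through the prefix via
-- the `vals` lists) by a greedy single pass over the same processing order that only tracks the
-- two smallest chosen points; A also sorts its argument in place, which B does not — the
-- equivalence proved here is about the return value only.

-- ===== PORT A =====
-- inner loop `for p in range(i-1,-1,-1): if L[p][1] < j: break; vals[p].append(j)`
-- (the Bool flag records that `break` has fired; the fold then skips the remaining p)
def pvPropA (L : List (List Int)) (j : Int) (i : Int) (vals : List (List Int)) : List (List Int) :=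
  ((PySem.List.pyRange (i - 1) (-1) (-1)).foldl
    (fun (acc : List (List Int) × Bool) p =>
      if acc.2 then acc
      else if PySem.List.pyGetD (PySem.List.pyGetD L p []) 1 0 < j then (acc.1, true)
      else (acc.1.set p.toNat (PySem.List.pyGetD acc.1 p [] ++ [j]), acc.2))
    (vals, false)).1

def intersectionSizeTwo2 (intervals : List (List Int)) : Int :=
  -- intervals.sort(key=lambda x: (x[0], -x[1]))  (in-place sort: L is the sorted list)
  let L := PySem.List.sorted2 intervals (fun x => PySem.List.pyGetD x 0 0)
             (fun x => -(PySem.List.pyGetD x 1 0)) false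
  let n : Int := PySem.List.len L
  let m : Int := 2
  let r := (PySem.List.pyRange (n - 1) (-1) (-1)).foldl
    (fun (st : Int × List (List Int)) i =>
      let j := PySem.List.pyGetD (PySem.List.pyGetD L i []) 0 0
      let inner := (PySem.List.pyRange ((PySem.List.pyGetD st.2 i []).length : Int) m 1).foldl
        (fun (st2 : Int × Int × List (List Int)) _k =>
          (st2.1 + 1, st2.2.1 + 1, pvPropA L st2.2.1 i st2.2.2))
        (st.1, j, st.2)
      (inner.1, inner.2.2))
    (0, (PySem.List.pyRange 0 n 1).map (fun _ => ([] : List Int)))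
  r.1

-- ===== PORT B =====
def intersectionSizeTwo2_alt (intervals : List (List Int)) : Int :=
  ((PySem.List.sorted2 intervals (fun x => PySem.List.pyGetD x 0 0)
      (fun x => -(PySem.List.pyGetD x 1 0)) true).foldl
    (fun (st : Int × Option (Int × Int)) x =>
      let s := PySem.List.pyGetD x 0 0
      let e := PySem.List.pyGetD x 1 0
      match st.2 with
      | none => (st.1 + 2, some (s, s + 1))
      | some (a, b) =>
        if e < a then (st.1 + 2, some (s, s + 1))
        else if e < b then (st.1 + 1, some (s, a))
        else st)
    ((0 : Int), (none : Option (Int × Int)))).1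

-- ===== PRECONDITION & SPEC =====
-- A raises IndexError (x[1] in the sort key / the body) when some interval has fewer than two
-- entries; Pre_ excludes exactly those inputs (B raises there as well).
def Pre_intersectionSizeTwo2 (intervals : List (List Int)) : Prop :=
  ∀ iv ∈ intervals, 2 ≤ iv.length
instance (intervals : List (List Int)) : Decidable (Pre_intersectionSizeTwo2 intervals) := by
  unfold Pre_intersectionSizeTwo2; infer_instance
def pvWitness_intersectionSizeTwo2 : List (List Int) := [[1, 3], [1, 2]]

def Spec_intersectionSizeTwo2 (intervals : List (List Int)) (out : Int) : Prop := out = intersectionSizeTwo2_alt intervals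
instance (intervals : List (List Int)) (out : Int) : Decidable (Spec_intersectionSizeTwo2 intervals out) := by unfold Spec_intersectionSizeTwo2; infer_instance

-- ===== CLAIM (what is proved, stated in full; the proofs are below) =====
def Claim_equal_intersectionSizeTwo2 : Prop := ∀ (intervals : List (List Int)), Dom_intersectionSizeTwo2 intervals → Pre_intersectionSizeTwo2 intervals → Spec_intersectionSizeTwo2 intervals (intersectionSizeTwo2 intervals)

-- ===== LEMMAS AND PROOFS =====

-- ---- proof-side abbreviations ----
def pvF (x : List Int) : Int × Int := (PySem.List.pyGetD x 0 0, PySem.List.pyGetD x 1 0)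

def pvKey (x : List Int) : Lex (Int × Int) :=
  toLex (PySem.List.pyGetD x 0 0, -(PySem.List.pyGetD x 1 0))

def pvE (P : List (Int × Int)) (k : Nat) : Int := (P.getD k (0, 0)).2
def pvS (P : List (Int × Int)) (k : Nat) : Int := (P.getD k (0, 0)).1

def pvCmin (P : List (Int × Int)) (p t : Nat) : Int :=
  (List.Ico p t).foldl (fun m k => min m (pvE P k)) (pvE P p)

def pvCnt (st : Option (Int × Int)) (m : Int) : Nat :=
  match st with
  | none => 0
  | some (a, b) => (if a ≤ m then 1 else 0) + (if b ≤ m then 1 else 0)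

-- B's loop body on (s, e) pairs
def pvBstep (acc : Int × Option (Int × Int)) (se : Int × Int) : Int × Option (Int × Int) :=
  match acc.2 with
  | none => (acc.1 + 2, some (se.1, se.1 + 1))
  | some (a, b) =>
    if se.2 < a then (acc.1 + 2, some (se.1, se.1 + 1))
    else if se.2 < b then (acc.1 + 1, some (se.1, a))
    else acc

-- A's outer loop body
def pvAstep (L : List (List Int)) (st : Int × List (List Int)) (i : Int) : Int × List (List Int) :=
  let j := PySem.List.pyGetD (PySem.List.pyGetD L i []) 0 0
  let inner := (PySem.List.pyRange ((PySem.List.pyGetD st.2 i []).length : Int) 2 1).foldl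
    (fun (st2 : Int × Int × List (List Int)) _k =>
      (st2.1 + 1, st2.2.1 + 1, pvPropA L st2.2.1 i st2.2.2))
    (st.1, j, st.2)
  (inner.1, inner.2.2)

-- the loop invariant relating A's vals array to B's two tracked points
def pvInv (P : List (Int × Int)) (t : Nat) (vals : List (List Int)) (st : Option (Int × Int)) : Prop :=
  vals.length = P.length ∧
  (∀ p, p < t → (vals.getD p []).length = pvCnt st (pvCmin P p t)) ∧
  (∀ a b, st = some (a, b) → a ≤ b ∧ ∀ p, p < t → pvS P p ≤ a)

-- ---- sorted2 vs sorted with a lexicographic key ----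
lemma pv_sorted2_eq_sorted (xs : List (List Int)) (k1 k2 : List Int → Int) (rev : Bool) :
    PySem.List.sorted2 xs k1 k2 rev
      = PySem.List.sorted xs (fun x => (toLex (k1 x, k2 x) : Lex (Int × Int))) rev := by
  unfold PySem.List.sorted2 PySem.List.sorted
  have hlt : (fun a b => decide (k1 a < k1 b) || (!decide (k1 b < k1 a) && decide (k2 a < k2 b)))
      = fun a b => decide ((toLex (k1 a, k2 a) : Lex (Int × Int)) < toLex (k1 b, k2 b)) := by
    funext a b
    rw [Bool.eq_iff_iff]
    simp only [Bool.or_eq_true, Bool.and_eq_true, Bool.not_eq_true', decide_eq_true_eq,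
      decide_eq_false_iff_not, Prod.Lex.lt_iff, ofLex_toLex]
    constructor
    · rintro (h | ⟨h1, h2⟩)
      · exact Or.inl h
      · by_cases h' : k1 a < k1 b
        · exact Or.inl h'
        · exact Or.inr ⟨by omega, h2⟩
    · rintro (h | ⟨h1, h2⟩)
      · exact Or.inl h
      · exact Or.inr ⟨by omega, h2⟩
  rw [hlt]

-- sorted descending, mapped to (s,e) pairs, is the reverse of sorted ascending mapped likewise
lemma pv_map_rev (xs : List (List Int)) :
    (PySem.List.sorted xs pvKey true).map pvF
      = ((PySem.List.sorted xs pvKey false).map pvF).reverse := by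
  have hg : ∀ u : List Int, pvKey u = toLex (( (pvF u).1 , -((pvF u).2))) := fun u => rfl
  apply List.eq_of_perm_of_sorted (le := fun u v => (toLex (v.1, -v.2) : Lex (Int × Int)) ≤ toLex (u.1, -u.2))
  · intro a b _ _ h1 h2
    have : (toLex (b.1, -b.2) : Lex (Int × Int)) = toLex (a.1, -a.2) := le_antisymm h1 h2
    have h3 : (b.1, -b.2) = (a.1, -a.2) := by
      have := congrArg ofLex this
      simpa using this
    rw [Prod.ext_iff] at h3 ⊢
    constructor
    · omega
    · omega
  · rw [List.pairwise_map]
    exact PySem.List.sorted_pairwise_rev xs pvKey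
  · rw [List.pairwise_reverse, List.pairwise_map]
    exact PySem.List.sorted_pairwise xs pvKey
  · exact ((PySem.List.sorted_perm xs pvKey true).map pvF).trans
      (((List.reverse_perm _).trans ((PySem.List.sorted_perm xs pvKey false).map pvF)).symm)

-- ---- pvPropA characterisation ----
lemma pvPropA_flag (L : List (List Int)) (j : Int) (l : List Int) (vals : List (List Int)) :
    l.foldl (fun (acc : List (List Int) × Bool) p =>
      if acc.2 then acc
      else if PySem.List.pyGetD (PySem.List.pyGetD L p []) 1 0 < j then (acc.1, true)
      else (acc.1.set p.toNat (PySem.List.pyGetD acc.1 p [] ++ [j]), acc.2)) (vals, true)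
    = (vals, true) := by
  induction l generalizing vals with
  | nil => rfl
  | cons x l ih => simpa using ih vals

lemma pvPropA_zero (L : List (List Int)) (j : Int) (vals : List (List Int)) :
    pvPropA L j 0 vals = vals := by
  unfold pvPropA
  rw [PySem.List.pyRange_neg_one_eq_nil (by omega)]
  rfl

lemma pvPropA_succ (L : List (List Int)) (j : Int) (i : Nat) (vals : List (List Int)) :
    pvPropA L j ((i : Int) + 1) vals
      = if PySem.List.pyGetD (PySem.List.pyGetD L (i : Int) []) 1 0 < j then vals
        else pvPropA L j (i : Int) (vals.set i (vals.getD i [] ++ [j])) := by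
  unfold pvPropA
  rw [show ((i : Int) + 1 - 1) = (i : Int) by ring,
      PySem.List.pyRange_neg_one_cons (by omega : (-1 : Int) < (i : Int))]
  rw [List.foldl_cons]
  simp only [Int.toNat_natCast, PySem.List.pyGetD_natCast]
  by_cases h : PySem.List.pyGetD (L.getD i []) 1 0 < j
  · simp only [h, if_true, Bool.false_eq_true, if_false]
    rw [pvPropA_flag]
  · simp only [h, if_true, Bool.false_eq_true, if_false]

lemma pvPropA_length (L : List (List Int)) (j : Int) (i : Nat) (vals : List (List Int)) :
    (pvPropA L j (i : Int) vals).length = vals.length := by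
  induction i generalizing vals with
  | zero =>
    rw [show ((0:Nat):Int) = 0 by rfl, pvPropA_zero]
  | succ i ih =>
    rw [show ((i+1:Nat):Int) = (i:Int)+1 by push_cast; ring, pvPropA_succ]
    split_ifs
    · rfl
    · rw [ih]; simp

lemma pvPropA_getD (L : List (List Int)) (j : Int) (i : Nat) (vals : List (List Int))
    (hi : i ≤ vals.length) (q : Nat) :
    (pvPropA L j (i : Int) vals).getD q []
      = if q < i ∧ ∀ r ∈ List.Ico q i, j ≤ PySem.List.pyGetD (PySem.List.pyGetD L (r : Int) []) 1 0
        then vals.getD q [] ++ [j] else vals.getD q [] := by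
  induction i generalizing vals with
  | zero =>
    rw [show ((0:Nat):Int) = 0 by rfl, pvPropA_zero]
    simp
  | succ i ih =>
    rw [show ((i+1:Nat):Int) = (i:Int)+1 by push_cast; ring, pvPropA_succ]
    by_cases h : PySem.List.pyGetD (PySem.List.pyGetD L (i : Int) []) 1 0 < j
    · rw [if_pos h, if_neg]
      rintro ⟨hq, hch⟩
      exact absurd (hch i (by rw [List.Ico.mem]; omega)) (by simpa using h)
    · rw [if_neg h, ih _ (by simp; omega)]
      have hEi : j ≤ PySem.List.pyGetD (PySem.List.pyGetD L (i : Int) []) 1 0 := le_of_not_gt h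
      rcases lt_trichotomy q i with hq | rfl | hq
      · have hset : (vals.set i (vals.getD i [] ++ [j])).getD q [] = vals.getD q [] := by
          rw [List.getD_eq_getElem?_getD, List.getD_eq_getElem?_getD, List.getElem?_set_ne (by omega)]
          rfl
        rw [hset]
        by_cases hc : ∀ r ∈ List.Ico q i, j ≤ PySem.List.pyGetD (PySem.List.pyGetD L (r : Int) []) 1 0
        · have hcc : q < i + 1 ∧ ∀ r ∈ List.Ico q (i+1), j ≤ PySem.List.pyGetD (PySem.List.pyGetD L (r : Int) []) 1 0 := by
            refine ⟨by omega, fun r hr => ?_⟩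
            rw [List.Ico.mem] at hr
            by_cases hri : r = i
            · subst hri; exact hEi
            · exact hc r (by rw [List.Ico.mem]; omega)
          rw [if_pos ⟨hq, hc⟩, if_pos hcc]
        · rw [if_neg, if_neg]
          · rintro ⟨_, hc'⟩
            exact hc fun r hr => hc' r (by rw [List.Ico.mem] at hr ⊢; omega)
          · rintro ⟨_, hc'⟩
            exact hc fun r hr => hc' r (by rw [List.Ico.mem] at hr ⊢; omega)
      · have hset : (vals.set q (vals.getD q [] ++ [j])).getD q [] = vals.getD q [] ++ [j] := by
          rw [List.getD_eq_getElem?_getD, List.getElem?_set_self (by omega)]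
          simp
        have hcc : q < q + 1 ∧ ∀ r ∈ List.Ico q (q+1), j ≤ PySem.List.pyGetD (PySem.List.pyGetD L (r : Int) []) 1 0 := by
          refine ⟨by omega, fun r hr => ?_⟩
          rw [List.Ico.mem] at hr
          have : r = q := by omega
          subst this; exact hEi
        rw [if_neg (by rintro ⟨h1, _⟩; omega), hset, if_pos hcc]
      · have hset : (vals.set i (vals.getD i [] ++ [j])).getD q [] = vals.getD q [] := by
          rw [List.getD_eq_getElem?_getD, List.getD_eq_getElem?_getD, List.getElem?_set_ne (by omega)]
          rfl
        rw [hset, if_neg (by rintro ⟨h1, _⟩; omega), if_neg (by rintro ⟨h1, _⟩; omega)]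

-- ---- chain minimum ----
lemma pv_le_foldl_min (E : Nat → Int) (l : List Nat) (seed x : Int) :
    x ≤ l.foldl (fun m k => min m (E k)) seed ↔ x ≤ seed ∧ ∀ k ∈ l, x ≤ E k := by
  induction l generalizing seed with
  | nil => simp
  | cons a l ih =>
    simp only [List.foldl_cons, ih, le_min_iff, List.mem_cons]
    aesop

lemma pv_le_cmin (P : List (Int × Int)) (p t : Nat) (h : p < t) (x : Int) :
    x ≤ pvCmin P p t ↔ ∀ r ∈ List.Ico p t, x ≤ pvE P r := by
  unfold pvCmin
  rw [pv_le_foldl_min]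
  constructor
  · rintro ⟨_, h2⟩; exact h2
  · intro h2; exact ⟨h2 p (by simp [List.Ico.mem]; omega), h2⟩

lemma pvCmin_self (P : List (Int × Int)) (p : Nat) : pvCmin P p (p + 1) = pvE P p := by
  unfold pvCmin
  rw [List.Ico.succ_top (le_refl p), List.Ico.self_empty]
  simp

lemma pvCmin_succ (P : List (Int × Int)) (p t : Nat) (h : p ≤ t) :
    pvCmin P p (t + 1) = min (pvCmin P p t) (pvE P t) := by
  unfold pvCmin
  rw [List.Ico.succ_top h, List.foldl_append]
  rfl

-- ---- bridging L and P = L.map pvF ----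
lemma pvE_eq (L : List (List Int)) (r : Nat) :
    pvE (L.map pvF) r = PySem.List.pyGetD (PySem.List.pyGetD L (r : Int) []) 1 0 := by
  unfold pvE pvF
  rw [PySem.List.pyGetD_natCast]
  by_cases h : r < L.length
  · simp [List.getD_eq_getElem?_getD, List.getElem?_map, List.getElem?_eq_getElem h]
  · rw [List.getD_eq_getElem?_getD, List.getD_eq_getElem?_getD]
    rw [List.getElem?_eq_none (by simpa using not_lt.1 h), List.getElem?_eq_none (by omega)]
    simp [PySem.List.pyGetD]
    decide

lemma pvS_eq (L : List (List Int)) (r : Nat) :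
    pvS (L.map pvF) r = PySem.List.pyGetD (PySem.List.pyGetD L (r : Int) []) 0 0 := by
  unfold pvS pvF
  rw [PySem.List.pyGetD_natCast]
  by_cases h : r < L.length
  · simp [List.getD_eq_getElem?_getD, List.getElem?_map, List.getElem?_eq_getElem h]
  · rw [List.getD_eq_getElem?_getD, List.getD_eq_getElem?_getD]
    rw [List.getElem?_eq_none (by simpa using not_lt.1 h), List.getElem?_eq_none (by omega)]
    simp [PySem.List.pyGetD]
    decide

-- ---- invariant maintenance ----
lemma pv_inv_step0 (L : List (List Int)) (P : List (Int × Int)) (hP : P = L.map pvF)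
    (t : Nat) (ht : t + 1 ≤ P.length)
    (hmono : ∀ p q, p ≤ q → q < P.length → pvS P p ≤ pvS P q)
    (vals : List (List Int)) (st : Option (Int × Int))
    (hinv : pvInv P (t + 1) vals st)
    (hcnt : pvCnt st (pvE P t) = 0) :
    pvInv P t (pvPropA L (pvS P t + 1) (t : Int) (pvPropA L (pvS P t) (t : Int) vals))
      (some (pvS P t, pvS P t + 1)) := by
  subst hP
  obtain ⟨hlen, hcnts, hord⟩ := hinv
  set P := L.map pvF with hP
  refine ⟨by rw [pvPropA_length, pvPropA_length, hlen], ?_, ?_⟩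
  · intro p hp
    have hchain : ∀ x : Int, (∀ r ∈ List.Ico p t, x ≤ PySem.List.pyGetD (PySem.List.pyGetD L (r : Int) []) 1 0)
        ↔ x ≤ pvCmin P p t := by
      intro x
      rw [pv_le_cmin P p t hp]
      exact ⟨fun h r hr => by rw [hP, pvE_eq]; exact h r hr,
             fun h r hr => by have := h r hr; rwa [hP, pvE_eq] at this⟩
    have hz : (vals.getD p []).length = 0 := by
      rw [hcnts p (by omega), pvCmin_succ P p t (by omega)]
      cases st with
      | none => rfl
      | some ab =>
        obtain ⟨a, b⟩ := ab
        simp only [pvCnt] at hcnt ⊢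
        have h1 : ¬ a ≤ pvE P t := by split_ifs at hcnt <;> omega
        have h2 : ¬ b ≤ pvE P t := by split_ifs at hcnt <;> omega
        rw [if_neg (by rw [le_min_iff]; rintro ⟨_, h⟩; exact h1 h),
            if_neg (by rw [le_min_iff]; rintro ⟨_, h⟩; exact h2 h)]
    rw [pvPropA_getD L (pvS P t + 1) t _ (by rw [pvPropA_length]; omega) p,
        pvPropA_getD L (pvS P t) t vals (by omega) p]
    simp only [pvCnt]
    by_cases hs1 : pvS P t ≤ pvCmin P p t <;> by_cases hs2 : pvS P t + 1 ≤ pvCmin P p t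
    · rw [if_pos ⟨hp, (hchain _).2 hs2⟩, if_pos ⟨hp, (hchain _).2 hs1⟩]
      simp [← List.getD_eq_getElem?_getD, List.eq_nil_of_length_eq_zero hz, hs1, hs2]
    · rw [if_neg (fun hh => hs2 ((hchain _).1 hh.2)), if_pos ⟨hp, (hchain _).2 hs1⟩]
      simp [← List.getD_eq_getElem?_getD, List.eq_nil_of_length_eq_zero hz, hs1, hs2]
    · omega
    · rw [if_neg (fun hh => hs2 ((hchain _).1 hh.2)), if_neg (fun hh => hs1 ((hchain _).1 hh.2))]
      simp [← List.getD_eq_getElem?_getD, List.eq_nil_of_length_eq_zero hz, hs1, hs2]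
  · rintro a' b' heq
    injection heq with heq'
    rw [Prod.mk.injEq] at heq'
    obtain ⟨h1, h2⟩ := heq'
    subst h1; subst h2
    refine ⟨by omega, fun p hp => hmono p t (by omega) (by omega)⟩
lemma pv_inv_step1 (L : List (List Int)) (P : List (Int × Int)) (hP : P = L.map pvF)
    (t : Nat) (ht : t + 1 ≤ P.length)
    (hmono : ∀ p q, p ≤ q → q < P.length → pvS P p ≤ pvS P q)
    (vals : List (List Int)) (a b : Int)
    (hinv : pvInv P (t + 1) vals (some (a, b)))
    (hab : a ≤ pvE P t) (hbb : pvE P t < b) :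
    pvInv P t (pvPropA L (pvS P t) (t : Int) vals) (some (pvS P t, a)) := by
  subst hP
  obtain ⟨hlen, hcnt, hord⟩ := hinv
  set P := L.map pvF with hP
  refine ⟨by rw [pvPropA_length, hlen], ?_, ?_⟩
  · intro p hp
    rw [pvPropA_getD L (pvS P t) t vals (by omega) p]
    have hchain : (∀ r ∈ List.Ico p t, pvS P t ≤ PySem.List.pyGetD (PySem.List.pyGetD L (r : Int) []) 1 0)
        ↔ pvS P t ≤ pvCmin P p t := by
      rw [pv_le_cmin P p t hp]
      exact ⟨fun h r hr => by rw [hP, pvE_eq]; exact h r hr,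
             fun h r hr => by have := h r hr; rwa [hP, pvE_eq] at this⟩
    have hv := hcnt p (by omega)
    rw [pvCmin_succ P p t (by omega)] at hv
    have hmin1 : (a ≤ min (pvCmin P p t) (pvE P t)) ↔ a ≤ pvCmin P p t :=
      ⟨fun h => (le_min_iff.1 h).1, fun h => le_min_iff.2 ⟨h, hab⟩⟩
    have hmin2 : ¬ (b ≤ min (pvCmin P p t) (pvE P t)) := by
      rw [le_min_iff]; rintro ⟨_, h⟩; omega
    by_cases hs : pvS P t ≤ pvCmin P p t
    · rw [if_pos ⟨hp, hchain.2 hs⟩]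
      simp only [List.length_append, List.length_cons, List.length_nil, hv, pvCnt, hmin1,
        if_neg hmin2, if_pos hs]
      split_ifs <;> omega
    · rw [if_neg (fun hh => hs (hchain.1 hh.2)), hv]
      simp only [pvCnt, hmin1, if_neg hmin2, if_neg hs]
      split_ifs <;> omega
  · rintro a' b' heq
    injection heq with heq'
    rw [Prod.mk.injEq] at heq'
    obtain ⟨h1, h2⟩ := heq'
    subst h1; subst h2
    refine ⟨(hord a b rfl).2 t (by omega), fun p hp => hmono p t (by omega) (by omega)⟩
lemma pv_inv_step2 (P : List (Int × Int))
    (t : Nat) (vals : List (List Int)) (a b : Int)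
    (hinv : pvInv P (t + 1) vals (some (a, b)))
    (hbb : b ≤ pvE P t) :
    pvInv P t vals (some (a, b)) := by
  obtain ⟨hlen, hcnt, hord⟩ := hinv
  have hab : a ≤ b := (hord a b rfl).1
  refine ⟨hlen, ?_, ?_⟩
  · intro p hp
    rw [hcnt p (by omega), pvCmin_succ P p t (by omega)]
    have h1 : (a ≤ min (pvCmin P p t) (pvE P t)) ↔ a ≤ pvCmin P p t :=
      ⟨fun h => (le_min_iff.1 h).1, fun h => le_min_iff.2 ⟨h, le_trans hab hbb⟩⟩
    have h2 : (b ≤ min (pvCmin P p t) (pvE P t)) ↔ b ≤ pvCmin P p t :=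
      ⟨fun h => (le_min_iff.1 h).1, fun h => le_min_iff.2 ⟨h, hbb⟩⟩
    simp only [pvCnt, h1, h2]
  · rintro a' b' heq
    injection heq with heq'
    rw [Prod.mk.injEq] at heq'
    obtain ⟨h1, h2⟩ := heq'
    subst h1; subst h2
    exact ⟨hab, fun p hp => (hord _ _ rfl).2 p (by omega)⟩
-- ---- the main simulation ----
lemma pv_main (L : List (List Int)) (P : List (Int × Int)) (hP : P = L.map pvF)
    (hmono : ∀ p q, p ≤ q → q < P.length → pvS P p ≤ pvS P q)
    (t : Nat) (ht : t ≤ P.length) (ans : Int) (vals : List (List Int))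
    (st : Option (Int × Int)) (hinv : pvInv P t vals st) :
    ((PySem.List.pyRange ((t : Int) - 1) (-1) (-1)).foldl (pvAstep L) (ans, vals)).1
      = ((P.take t).reverse.foldl pvBstep (ans, st)).1 := by
  induction t generalizing ans vals st with
  | zero =>
    rw [show ((0:Nat):Int) - 1 = -1 by rfl, PySem.List.pyRange_neg_one_eq_nil (by omega)]
    rfl
  | succ t ih =>
    have htP : t < P.length := by omega
    obtain ⟨hlen, hcnts, hord⟩ := hinv
    have hS : pvS P t = P[t].1 := by
      unfold pvS
      rw [List.getD_eq_getElem?_getD, List.getElem?_eq_getElem htP]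
      rfl
    have hE : pvE P t = P[t].2 := by
      unfold pvE
      rw [List.getD_eq_getElem?_getD, List.getElem?_eq_getElem htP]
      rfl
    rw [List.take_succ, List.getElem?_eq_getElem htP, Option.toList_some,
        List.reverse_append, List.reverse_singleton, List.singleton_append, List.foldl_cons]
    rw [show ((t+1:Nat):Int) - 1 = (t:Int) by push_cast; ring,
        PySem.List.pyRange_neg_one_cons (by omega), List.foldl_cons]
    have hj : PySem.List.pyGetD (PySem.List.pyGetD L (t:Int) []) 0 0 = pvS P t := by
      rw [hP, pvS_eq]
    have hlenv : (PySem.List.pyGetD vals (t:Int) []).length = pvCnt st (pvE P t) := by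
      rw [PySem.List.pyGetD_natCast, hcnts t (by omega), pvCmin_self]
    have h01 : PySem.List.pyRange ((0:Nat) : Int) 2 1 = [0, 1] := by decide
    have h11 : PySem.List.pyRange ((1:Nat) : Int) 2 1 = [1] := by decide
    have h21 : PySem.List.pyRange ((2:Nat) : Int) 2 1 = [] := by decide
    cases st with
    | none =>
      have hc0 : pvCnt none (pvE P t) = 0 := rfl
      have hstep := pv_inv_step0 L P hP t (by omega) hmono vals none ⟨hlen, hcnts, hord⟩ hc0
      simp only [pvAstep, hlenv, hc0, h01, List.foldl_cons, List.foldl_nil, hj, pvBstep]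
      rw [show ans + 1 + 1 = ans + 2 by ring, ← hS]
      exact ih (by omega) (ans + 2) _ _ hstep
    | some ab =>
      obtain ⟨a, b⟩ := ab
      have hab : a ≤ b := (hord a b rfl).1
      by_cases hca : pvE P t < a
      · -- e < a : count 0, two new points
        have hc0 : pvCnt (some (a, b)) (pvE P t) = 0 := by
          simp only [pvCnt]
          rw [if_neg (by omega), if_neg (by omega)]
        have hstep := pv_inv_step0 L P hP t (by omega) hmono vals _ ⟨hlen, hcnts, hord⟩ hc0
        simp only [pvAstep, hlenv, hc0, h01, List.foldl_cons, List.foldl_nil, hj, pvBstep]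
        rw [if_pos (by rw [← hE]; exact hca), show ans + 1 + 1 = ans + 2 by ring, ← hS]
        exact ih (by omega) (ans + 2) _ _ hstep
      · by_cases hcb : pvE P t < b
        · -- a ≤ e < b : count 1, one new point
          have hc1 : pvCnt (some (a, b)) (pvE P t) = 1 := by
            simp only [pvCnt]
            rw [if_pos (by omega), if_neg (by omega)]
          have hstep := pv_inv_step1 L P hP t (by omega) hmono vals a b ⟨hlen, hcnts, hord⟩ (by omega) hcb
          simp only [pvAstep, hlenv, hc1, h11, List.foldl_cons, List.foldl_nil, hj, pvBstep]
          rw [if_neg (by rw [← hE]; omega), if_pos (by rw [← hE]; exact hcb), ← hS]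
          exact ih (by omega) (ans + 1) _ _ hstep
        · -- b ≤ e : count 2, nothing to do
          have hc2 : pvCnt (some (a, b)) (pvE P t) = 2 := by
            simp only [pvCnt]
            rw [if_pos (by omega), if_pos (by omega)]
          have hstep := pv_inv_step2 P t vals a b ⟨hlen, hcnts, hord⟩ (by omega)
          simp only [pvAstep, hlenv, hc2, h21, List.foldl_nil, hj, pvBstep]
          rw [if_neg (by rw [← hE]; omega), if_neg (by rw [← hE]; omega)]
          exact ih (by omega) ans _ _ hstep
-- ===== VERDICT (by name: the statement is the Claim_ definition above) =====
-- named pieces of the assembly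
def pvAfold (M : List (List Int)) : Int :=
  ((PySem.List.pyRange ((M.length : Int) - 1) (-1) (-1)).foldl (pvAstep M)
    (0, (PySem.List.pyRange 0 (M.length : Int) 1).map (fun _ => ([] : List Int)))).1

lemma pv_L_eq (intervals : List (List Int)) :
    PySem.List.sorted2 intervals (fun x => PySem.List.pyGetD x 0 0)
      (fun x => -(PySem.List.pyGetD x 1 0)) false
    = PySem.List.sorted intervals pvKey false := by
  rw [pv_sorted2_eq_sorted]
  rfl

lemma pv_D_eq (intervals : List (List Int)) :
    PySem.List.sorted2 intervals (fun x => PySem.List.pyGetD x 0 0)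
      (fun x => -(PySem.List.pyGetD x 1 0)) true
    = PySem.List.sorted intervals pvKey true := by
  rw [pv_sorted2_eq_sorted]
  rfl

lemma pv_mono (L : List (List Int)) (hL : L.Pairwise (fun a b => pvKey a ≤ pvKey b)) :
    ∀ p q, p ≤ q → q < (L.map pvF).length → pvS (L.map pvF) p ≤ pvS (L.map pvF) q := by
  intro p q hpq hq
  rw [List.length_map] at hq
  rcases eq_or_lt_of_le hpq with rfl | hlt
  · exact le_refl _
  have hkey := List.pairwise_iff_getElem.1 hL p q (by omega) hq hlt
  have h1 : ∀ r, ∀ hr : r < L.length, pvS (L.map pvF) r = (ofLex (pvKey (L[r]'hr))).1 := by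
    intro r hr
    unfold pvS pvKey pvF
    rw [List.getD_eq_getElem?_getD, List.getElem?_map, List.getElem?_eq_getElem hr]
    rfl
  rw [h1 p (by omega), h1 q hq]
  rw [Prod.Lex.le_iff] at hkey
  rcases hkey with h | ⟨h, _⟩
  · exact le_of_lt h
  · exact le_of_eq h

theorem intersectionSizeTwo2_spec : Claim_equal_intersectionSizeTwo2 := by
  intro intervals _hdom _hpre
  unfold Spec_intersectionSizeTwo2
  set L := PySem.List.sorted intervals pvKey false with hLdef
  set P : List (Int × Int) := L.map pvF with hPdef
  have hPlen : P.length = L.length := by simp [hPdef]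
  -- A's port as a fold of pvAstep over the countdown range
  have hA : intersectionSizeTwo2 intervals = pvAfold L := by
    have h0 : intersectionSizeTwo2 intervals
        = pvAfold (PySem.List.sorted2 intervals (fun x => PySem.List.pyGetD x 0 0)
            (fun x => -(PySem.List.pyGetD x 1 0)) false) := rfl
    rw [h0, pv_L_eq]
  -- B's port as a fold of pvBstep over P.reverse
  have hB : intersectionSizeTwo2_alt intervals = (P.reverse.foldl pvBstep (0, none)).1 := by
    have h0 : intersectionSizeTwo2_alt intervals
        = ((PySem.List.sorted2 intervals (fun x => PySem.List.pyGetD x 0 0)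
            (fun x => -(PySem.List.pyGetD x 1 0)) true).foldl
            (fun (st : Int × Option (Int × Int)) x =>
              match st.2 with
              | none => (st.1 + 2, some (PySem.List.pyGetD x 0 0, PySem.List.pyGetD x 0 0 + 1))
              | some (a, b) =>
                if PySem.List.pyGetD x 1 0 < a then (st.1 + 2, some (PySem.List.pyGetD x 0 0, PySem.List.pyGetD x 0 0 + 1))
                else if PySem.List.pyGetD x 1 0 < b then (st.1 + 1, some (PySem.List.pyGetD x 0 0, a))
                else st)
            ((0 : Int), (none : Option (Int × Int)))).1 := rfl
    rw [h0, pv_D_eq]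
    have hfold : ∀ (l : List (List Int)) (init : Int × Option (Int × Int)),
        l.foldl (fun (st : Int × Option (Int × Int)) x =>
          match st.2 with
          | none => (st.1 + 2, some (PySem.List.pyGetD x 0 0, PySem.List.pyGetD x 0 0 + 1))
          | some (a, b) =>
            if PySem.List.pyGetD x 1 0 < a then (st.1 + 2, some (PySem.List.pyGetD x 0 0, PySem.List.pyGetD x 0 0 + 1))
            else if PySem.List.pyGetD x 1 0 < b then (st.1 + 1, some (PySem.List.pyGetD x 0 0, a))
            else st) init
        = (l.map pvF).foldl pvBstep init := by
      intro l init
      rw [List.foldl_map]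
      rfl
    rw [hfold, pv_map_rev, ← hLdef, ← hPdef]
  rw [hA, hB]
  unfold pvAfold
  -- initial state of A's vals
  set vals0 : List (List Int) := (PySem.List.pyRange 0 (L.length : Int) 1).map (fun _ => ([] : List Int)) with hv0def
  have hv0len : vals0.length = L.length := by
    rw [hv0def, List.length_map, PySem.List.length_pyRange_one]
    omega
  have hv0 : ∀ p : Nat, vals0.getD p [] = [] := by
    intro p
    rw [hv0def, show (fun _ : Int => ([] : List Int)) = Function.const Int ([] : List Int) from rfl,
        List.map_const]
    by_cases hp : p < (PySem.List.pyRange 0 (L.length : Int) 1).length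
    · exact List.getD_replicate _ hp
    · rw [List.getD_eq_default _ _ (by rw [List.length_replicate]; omega)]
  have hinv0 : pvInv P L.length vals0 none := by
    refine ⟨by rw [hv0len, hPlen], fun p _ => by rw [hv0]; rfl, fun a b h => by cases h⟩
  have hmono := pv_mono L (PySem.List.sorted_pairwise intervals pvKey)
  have := pv_main L P hPdef (by rw [hPdef] at *; exact hmono) L.length (by omega) 0 vals0 none hinv0
  rw [this, ← hPlen, List.take_length]
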